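-- pv_equiv track=rewrite | github.com/hopper-project/hoptex | demacro.py | take_whitespace
-- ===== SOURCE A (Python) =====
-- def take_whitespace(text):
--     spaces = []
--     for character in text:
--         if character in "\t\n %":
--             spaces.append(character)
--         else:
--             break
--     return (''.join(spaces), text[len(spaces):])
-- ===== SOURCE B (Python) =====
-- def take_whitespace(text):
--     rest = text.lstrip("\t\n %")
--     boundary = len(text) - len(rest)
--     return (text[:boundary], rest)
-- ===== Notes on version B (the rewrite author's own statement) =====
-- stated objective: idiomatic
-- what changed: Replaces the char-by-char accumulate-and-join loop with a single str.lstrip call plus length arithmetic to recover the prefix.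
import Mathlib
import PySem

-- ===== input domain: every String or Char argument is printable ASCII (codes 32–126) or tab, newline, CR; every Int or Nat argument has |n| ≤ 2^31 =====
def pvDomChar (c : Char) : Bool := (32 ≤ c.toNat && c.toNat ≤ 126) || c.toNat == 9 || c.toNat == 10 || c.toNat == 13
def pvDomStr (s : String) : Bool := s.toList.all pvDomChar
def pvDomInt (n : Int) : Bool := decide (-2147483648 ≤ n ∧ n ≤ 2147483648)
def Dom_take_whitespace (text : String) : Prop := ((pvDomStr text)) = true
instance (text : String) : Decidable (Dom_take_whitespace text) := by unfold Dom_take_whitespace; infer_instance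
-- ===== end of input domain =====

-- B replaces A's char-by-char accumulate-and-join loop with one lstrip call plus length arithmetic (idiomatic).


-- ===== PORT A =====
-- the loop 'for character in text: if character in "\t\n %": spaces.append(character) else: break'
-- ('character in "\t\n %"' for a single char is membership in the char list; exact here)
def twLoopA (acc : List Char) : List Char → List Char
  | [] => acc
  | c :: cs => if c ∈ "\t\n %".toList then twLoopA (acc ++ [c]) cs else acc

def take_whitespace (text : String) : String × String :=
  let spaces := twLoopA [] text.toList
  (String.mk spaces, String.mk (PySem.List.slice text.toList (some (spaces.length : Int)) none))

-- ===== PORT B =====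
-- rest = text.lstrip("\t\n %")  (lstrip with a chars argument = dropWhile membership; exact)
def take_whitespace_alt (text : String) : String × String :=
  let rest := text.toList.dropWhile (fun c => c ∈ "\t\n %".toList)
  let boundary := text.toList.length - rest.length
  (String.mk (text.toList.take boundary), String.mk rest)

-- ===== PRECONDITION & SPEC =====
def Spec_take_whitespace (text : String) (out : String × String) : Prop := out = take_whitespace_alt text
instance (text : String) (out : String × String) : Decidable (Spec_take_whitespace text out) := by unfold Spec_take_whitespace; infer_instance

-- ===== CLAIM (what is proved, stated in full; the proofs are below) =====
def Claim_equal_take_whitespace : Prop := ∀ (text : String), Dom_take_whitespace text → Spec_take_whitespace text (take_whitespace text)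

-- ===== LEMMAS AND PROOFS =====
theorem twLoopA_eq (cs acc : List Char) :
    twLoopA acc cs = acc ++ cs.takeWhile (fun c => c ∈ "\t\n %".toList) := by
  induction cs generalizing acc with
  | nil => simp [twLoopA]
  | cons c cs ih =>
      by_cases h : c ∈ "\t\n %".toList <;>
        · simp only [twLoopA, ih, List.takeWhile_cons]
          simp at h ⊢
          simp [h]

theorem drop_takeWhile_length (p : Char → Bool) (l : List Char) :
    l.drop (l.takeWhile p).length = l.dropWhile p := by
  induction l with
  | nil => rfl
  | cons c cs ih =>
      by_cases h : p c <;> simp [List.takeWhile_cons, List.dropWhile_cons, h, ih]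

theorem take_takeWhile_length (p : Char → Bool) (l : List Char) :
    l.take (l.takeWhile p).length = l.takeWhile p := by
  induction l with
  | nil => rfl
  | cons c cs ih =>
      by_cases h : p c <;> simp [List.takeWhile_cons, h, ih]

theorem len_sub_dropWhile (p : Char → Bool) (l : List Char) :
    l.length - (l.dropWhile p).length = (l.takeWhile p).length := by
  have h := List.takeWhile_append_dropWhile (p := p) (l := l)
  have h2 : (l.takeWhile p).length + (l.dropWhile p).length = l.length := by
    have h3 := congrArg List.length h
    rw [List.length_append] at h3
    exact h3
  omega

-- ===== VERDICT (by name: the statement is the Claim_ definition above) =====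
theorem take_whitespace_spec : Claim_equal_take_whitespace := by
  intro text _
  unfold Spec_take_whitespace take_whitespace take_whitespace_alt
  simp only [twLoopA_eq, List.nil_append]
  rw [PySem.List.slice_from _ (by positivity)]
  rw [len_sub_dropWhile, Int.toNat_natCast]
  rw [drop_takeWhile_length, take_takeWhile_length]
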